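-- pv_equiv track=rewrite | github.com/k-sunako/multi_mod_bernoulli | src/crt.py | alg10_3
-- ===== SOURCE A (Python) =====
-- import math
--
-- def alg10_3(ms):
--     r = len(ms)
--     k = int(math.log2(r))
--     M = [[1]*r for _ in range(k+1)]
--
--     for i in range(r):
--         M[0][i] = ms[i]
--
--     for i in range(1, k+1):
--         for j in range(0, 2**(k-i)):
--             M[i][j] = M[i-1][2*j] * M[i-1][2*j+1]
--
--     return M
-- ===== SOURCE B (Python) =====
-- import math
--
-- def alg10_3(ms):
--     r = len(ms)
--     k = r.bit_length() - 1
--     M = [list(ms)]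
--     for i in range(1, k + 1):
--         w = 1 << i
--         blocks = 1 << (k - i)
--         M.append([math.prod(ms[w * j : w * (j + 1)]) for j in range(blocks)]
--                  + [1] * (r - blocks))
--     return M
-- ===== Notes on version B (the rewrite author's own statement) =====
-- stated objective: alternative
-- what changed: Each product-tree node is computed directly as math.prod of its block slice of ms (independent per-level block scans appended row by row) instead of multiplying the two child entries of the previous level in a preallocated (k+1)xr matrix of ones; this trades A's O(r) total multiplications for O(r log r) (each node recomputed from scratch), so B is slower on large inputs.
import Mathlib
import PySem

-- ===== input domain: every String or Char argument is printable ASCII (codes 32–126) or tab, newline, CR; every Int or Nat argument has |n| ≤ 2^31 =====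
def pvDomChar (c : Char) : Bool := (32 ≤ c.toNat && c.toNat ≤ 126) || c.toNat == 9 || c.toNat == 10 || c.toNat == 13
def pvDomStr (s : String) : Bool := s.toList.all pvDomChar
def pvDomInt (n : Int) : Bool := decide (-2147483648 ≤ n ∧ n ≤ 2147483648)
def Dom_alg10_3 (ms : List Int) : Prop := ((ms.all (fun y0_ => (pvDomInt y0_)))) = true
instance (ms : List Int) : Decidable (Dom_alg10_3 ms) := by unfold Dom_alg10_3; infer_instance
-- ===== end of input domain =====

-- B computes every product-tree node directly as math.prod of a slice of ms (independent
-- per-block scans) instead of combining the two children of the level below; objective: alternative.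


-- ===== PORT A =====
-- int(math.log2 r) = Nat.log2 r is exact for every feasible nonempty list (r ≥ 1 well below
-- any float-rounding regime); r = 0 (math domain error) is excluded by Pre_.
-- Python's M[i][j] = v on a list of lists is ported as M.set i ((M.getD i []).set j v);
-- all indices are in range in A, so getD's default is never used.
def alg10_3 (ms : List Int) : List (List Int) :=
  let r := ms.length
  let k := Nat.log2 r
  let M0 := List.replicate (k+1) (List.replicate r (1 : Int))
  let M1 := (List.range r).foldl (fun M i => M.set 0 ((M.getD 0 []).set i (ms.getD i 0))) M0
  (List.range' 1 k).foldl (fun M i =>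
    (List.range (2 ^ (k - i))).foldl (fun M j =>
      let v := ((M.getD (i-1) []).getD (2*j) 0) * ((M.getD (i-1) []).getD (2*j+1) 0)
      M.set i ((M.getD i []).set j v)) M) M1

-- ===== PORT B =====
-- r.bit_length() ported by hand (exact): 0 for r = 0, else Nat.log2 r + 1.
-- math.prod of a list slice is ported as (PySem.List.slice …).prod.
def alg10_3_alt (ms : List Int) : List (List Int) :=
  let r := ms.length
  let bitLen : Nat := if r = 0 then 0 else Nat.log2 r + 1
  let k : Int := (bitLen : Int) - 1
  (List.range' 1 k.toNat).foldl (fun M i =>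
    let w := 2 ^ i
    let blocks := 2 ^ (k.toNat - i)
    M ++ [(List.range blocks).map
            (fun j => (PySem.List.slice ms (some ((w*j : Nat) : Int)) (some ((w*(j+1) : Nat) : Int))).prod)
          ++ List.replicate (r - blocks) (1 : Int)]) [ms]

-- ===== PRECONDITION & SPEC =====
-- Pre_ excludes only the empty list, on which A raises ValueError (math.log2(0)).
def Pre_alg10_3 (ms : List Int) : Prop := ms ≠ []
instance (ms : List Int) : Decidable (Pre_alg10_3 ms) := by unfold Pre_alg10_3; infer_instance
def pvWitness_alg10_3 : List Int := [2, 3, 5, 7, 11]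

def Spec_alg10_3 (ms : List Int) (out : List (List Int)) : Prop := out = alg10_3_alt ms
instance (ms : List Int) (out : List (List Int)) : Decidable (Spec_alg10_3 ms out) := by unfold Spec_alg10_3; infer_instance

-- ===== CLAIM (what is proved, stated in full; the proofs are below) =====
def Claim_equal_alg10_3 : Prop := ∀ (ms : List Int), Dom_alg10_3 ms → Pre_alg10_3 ms → Spec_alg10_3 ms (alg10_3 ms)

-- ===== LEMMAS AND PROOFS =====

-- product of the block of ms of width 2^i starting at 2^i * j
def pvBp (ms : List Int) (i j : Nat) : Int := ((ms.drop (2^i * j)).take (2^i)).prod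

-- the level-i row (i ≥ 1) of the finished tree
def pvRow (ms : List Int) (k i : Nat) : List Int :=
  (List.range (2 ^ (k - i))).map (pvBp ms i) ++ List.replicate (ms.length - 2 ^ (k - i)) 1

-- the common closed form both ports are proved equal to (for ms ≠ [])
def pvModel (ms : List Int) : List (List Int) :=
  ms :: (List.range' 1 (Nat.log2 ms.length)).map (pvRow ms (Nat.log2 ms.length))

theorem pv_set_append_len {α : Type} (P S : List α) (c x : α) :
    (P ++ c :: S).set P.length x = P ++ x :: S := by
  induction P with
  | nil => rfl
  | cons _ t ih => simpa using ih

theorem pv_getD_cons_len {α : Type} (P S : List α) (c d : α) :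
    (P ++ c :: S).getD P.length d = c := by
  induction P with
  | nil => rfl
  | cons _ t ih => simpa using ih

theorem pv_getD_map_range (f : Nat → Int) (n t : Nat) (d : Int) (h : t < n) :
    ((List.range n).map f).getD t d = f t := by
  rw [List.getD_eq_getElem _ _ (by simpa using h)]
  simp

-- filling indices 0..n-1 of an all-ones row of length r
theorem pv_fill_row (b : Nat → Int) (r : Nat) :
    ∀ n, n ≤ r →
      (List.range n).foldl (fun row j => row.set j (b j)) (List.replicate r (1 : Int))
        = (List.range n).map b ++ List.replicate (r - n) 1 := by
  intro n
  induction n with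
  | zero => simp
  | succ n ih =>
    intro hn
    rw [List.range_succ, List.foldl_append, ih (by omega), List.foldl_cons, List.foldl_nil]
    have hrep : List.replicate (r - n) (1 : Int) = 1 :: List.replicate (r - (n+1)) 1 := by
      have : r - n = (r - (n+1)) + 1 := by omega
      rw [this, List.replicate_succ]
    rw [hrep]
    have hlen : ((List.range n).map b).length = n := by simp
    calc ((List.range n).map b ++ 1 :: List.replicate (r - (n+1)) 1).set n (b n)
        = ((List.range n).map b ++ 1 :: List.replicate (r - (n+1)) 1).set ((List.range n).map b).length (b n) := by rw [hlen]
      _ = (List.range n).map b ++ b n :: List.replicate (r - (n+1)) 1 := pv_set_append_len _ _ _ _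
      _ = (List.range n ++ [n]).map b ++ List.replicate (r - (n+1)) 1 := by
            simp

theorem pv_inner_fold (hf : List Int → Nat → Int)
    (P : List (List Int)) (S : List (List Int)) (hP : P ≠ []) :
    ∀ (n : Nat) (cur : List Int),
      (List.range n).foldl (fun M j =>
          M.set P.length ((M.getD P.length []).set j (hf (M.getD (P.length - 1) []) j))) (P ++ cur :: S)
        = P ++ ((List.range n).foldl (fun row j => row.set j (hf (P.getD (P.length - 1) []) j)) cur) :: S := by
  intro n
  induction n with
  | zero => simp
  | succ n ih =>
    intro cur
    rw [List.range_succ, List.foldl_append, List.foldl_append, ih, List.foldl_cons, List.foldl_nil,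
        List.foldl_cons, List.foldl_nil]
    set cur' := (List.range n).foldl (fun row j => row.set j (hf (P.getD (P.length - 1) []) j)) cur with hcur
    have hread : (P ++ cur' :: S).getD (P.length - 1) [] = P.getD (P.length - 1) [] :=
      List.getD_append _ _ _ _ (by cases P with | nil => exact absurd rfl hP | cons a t => simp)
    rw [hread, pv_getD_cons_len, pv_set_append_len]

-- reading an entry of a finished row gives the block product
theorem pv_getD_row (ms : List Int) (k i t : Nat) (ht : t < 2 ^ (k - i)) :
    (pvRow ms k i).getD t 0 = pvBp ms i t := by
  unfold pvRow
  rw [List.getD_append _ _ _ _ (by simpa using ht), pv_getD_map_range _ _ _ _ ht]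

theorem pv_getD_ms (ms : List Int) (t : Nat) (ht : t < ms.length) :
    ms.getD t 0 = pvBp ms 0 t := by
  unfold pvBp
  rw [pow_zero, one_mul, List.drop_eq_getElem_cons ht, List.getD_eq_getElem _ _ ht]
  have h1 : (ms[t] :: ms.drop (t+1)).take 1 = [ms[t]] := rfl
  rw [h1, List.prod_singleton]

-- two sibling block products multiply to their parent's
theorem pv_bp_mul (ms : List Int) (i j : Nat) :
    pvBp ms i (2*j) * pvBp ms i (2*j+1) = pvBp ms (i+1) j := by
  unfold pvBp
  have h1 : 2 ^ (i+1) * j = 2 ^ i * (2*j) := by ring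
  have h2 : (2:Nat) ^ (i+1) = 2 ^ i + 2 ^ i := by ring
  have h3 : (ms.drop (2^i*(2*j))).drop (2^i) = ms.drop (2^i*(2*j+1)) := by
    rw [List.drop_drop]; congr 1
  rw [h1, h2, List.take_add, List.prod_append, h3]

-- ===== A's port equals the model =====

theorem pv_phase1 (x : List Int) (rest : List (List Int)) (b : Nat → Int) (n : Nat) :
    (List.range n).foldl (fun M i => M.set 0 ((M.getD 0 []).set i (b i))) (x :: rest)
      = ((List.range n).foldl (fun row i => row.set i (b i)) x) :: rest := by
  induction n generalizing x with
  | zero => simp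
  | succ n ih =>
    rw [List.range_succ, List.foldl_append, List.foldl_append, ih,
        List.foldl_cons, List.foldl_nil, List.foldl_cons, List.foldl_nil]
    rfl

theorem pv_map_getD_self (ms : List Int) : (List.range ms.length).map (fun i => ms.getD i 0) = ms := by
  apply List.ext_getElem
  · simp
  · intro i h1 h2
    simp only [List.getElem_map, List.getElem_range]
    exact List.getD_eq_getElem ms 0 h2

-- the outer i-loop invariant
theorem pv_outer (ms : List Int) (hms : ms ≠ []) :
    ∀ i, i ≤ Nat.log2 ms.length →
      (List.range' 1 i).foldl (fun M i =>
          (List.range (2 ^ (Nat.log2 ms.length - i))).foldl (fun M j =>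
            let v := ((M.getD (i-1) []).getD (2*j) 0) * ((M.getD (i-1) []).getD (2*j+1) 0)
            M.set i ((M.getD i []).set j v)) M)
        (ms :: List.replicate (Nat.log2 ms.length) (List.replicate ms.length (1 : Int)))
      = ms :: ((List.range' 1 i).map (pvRow ms (Nat.log2 ms.length))
          ++ List.replicate (Nat.log2 ms.length - i) (List.replicate ms.length (1 : Int))) := by
  set r := ms.length with hr
  set k := Nat.log2 r with hk
  have hr1 : 1 ≤ r := by
    cases ms with | nil => exact absurd rfl hms | cons a t => simp [hr]
  have hpow : 2 ^ k ≤ r := Nat.log2_self_le (by omega)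
  intro i
  induction i with
  | zero => simp
  | succ i ih =>
    intro hik
    rw [List.range'_1_concat, List.foldl_append, ih (by omega), List.foldl_cons, List.foldl_nil]
    -- state: ms :: map pvRow (range' 1 i) ++ replicate (k-i) ones ; now run level 1+i
    set P : List (List Int) := ms :: (List.range' 1 i).map (pvRow ms k) with hP
    have hPlen : P.length = 1 + i := by simp [hP]; omega
    have hkrep : List.replicate (k - i) (List.replicate r (1:Int))
        = List.replicate r (1:Int) :: List.replicate (k - (i+1)) (List.replicate r (1:Int)) := by
      have : k - i = (k - (i+1)) + 1 := by omega
      rw [this, List.replicate_succ]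
    have hassoc : ms :: ((List.range' 1 i).map (pvRow ms k)
        ++ List.replicate r (1:Int) :: List.replicate (k - (i+1)) (List.replicate r (1:Int)))
        = P ++ List.replicate r (1:Int) :: List.replicate (k - (i+1)) (List.replicate r (1:Int)) := by
      simp [hP]
    rw [hkrep, hassoc]
    have hfold := pv_inner_fold
      (fun prev j => prev.getD (2*j) 0 * prev.getD (2*j+1) 0)
      P (List.replicate (k - (i+1)) (List.replicate r (1:Int))) (by simp [hP])
      (2 ^ (k - (1+i))) (List.replicate r (1:Int))
    rw [hPlen] at hfold
    rw [hfold]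
    -- identify the previous row
    have hprev : P.getD (1 + i - 1) [] = if i = 0 then ms else pvRow ms k i := by
      cases i with
      | zero => simp [hP]
      | succ m =>
        simp only [hP]
        have hm : 1 + (m+1) - 1 = m + 1 := by omega
        rw [hm]
        show ((List.range' 1 (m+1)).map (pvRow ms k)).getD m [] = _
        rw [List.getD_eq_getElem _ _ (by simp)]
        simp
        congr 1
    -- the freshly-built row is pvRow (i+1), i.e. pvRow (1+i)
    have hn_le : 2 ^ (k - (1+i)) ≤ r := le_trans (Nat.pow_le_pow_right (by omega) (by omega)) hpow
    rw [pv_fill_row _ r _ hn_le]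
    have hval : ∀ t ∈ List.range (2 ^ (k - (1+i))),
        (fun j => (P.getD (1+i-1) []).getD (2*j) 0 * (P.getD (1+i-1) []).getD (2*j+1) 0) t
          = pvBp ms (i+1) t := by
      intro t htm
      have ht : t < 2 ^ (k - (1+i)) := List.mem_range.mp htm
      have hread : ∀ s, s < 2 ^ (k - i) → (P.getD (1+i-1) []).getD s 0 = pvBp ms i s := by
        intro s hs
        rw [hprev]
        by_cases h0 : i = 0
        · subst h0
          simp only
          exact pv_getD_ms ms s (lt_of_lt_of_le (by simpa using hs) hpow)
        · rw [if_neg h0]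
          exact pv_getD_row ms k i s hs
      have hsib : 2*t+1 < 2 ^ (k - i) := by
        have : k - i = (k - (1+i)) + 1 := by omega
        rw [this, pow_succ]
        omega
      simp only
      rw [hread _ (by omega), hread _ hsib, pv_bp_mul]
    rw [List.map_congr_left hval]
    have hrow : (List.range (2 ^ (k - (1+i)))).map (pvBp ms (i+1)) ++ List.replicate (r - 2 ^ (k - (1+i))) 1
        = pvRow ms k (1+i) := by
      unfold pvRow
      have hc : (1:Nat) + i = i + 1 := by omega
      rw [hc]
    rw [hrow, List.map_append]
    simp [hP]

theorem pv_A_eq_model (ms : List Int) (hms : ms ≠ []) : alg10_3 ms = pvModel ms := by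
  unfold alg10_3 pvModel
  simp only
  set r := ms.length with hr
  set k := Nat.log2 r with hk
  have hr1 : 1 ≤ r := by cases ms with | nil => exact absurd rfl hms | cons a t => simp [hr]
  have hrep : List.replicate (k+1) (List.replicate r (1:Int))
      = List.replicate r (1:Int) :: List.replicate k (List.replicate r (1:Int)) := List.replicate_succ
  rw [hrep, pv_phase1, pv_fill_row _ r r le_rfl, Nat.sub_self, List.replicate_zero, List.append_nil,
      pv_map_getD_self]
  have := pv_outer ms hms k le_rfl
  rw [← hr, ← hk] at this
  rw [this, Nat.sub_self, List.replicate_zero, List.append_nil]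

-- ===== B's port equals the model =====

theorem pv_foldl_append_map {α β : Type} (f : α → β) (l : List α) (init : List β) :
    l.foldl (fun M x => M ++ [f x]) init = init ++ l.map f := by
  induction l generalizing init with
  | nil => simp
  | cons _ t ih => simpa using ih

theorem pv_slice_prod (ms : List Int) (w j : Nat) :
    (PySem.List.slice ms (some ((w*j : Nat) : Int)) (some ((w*(j+1) : Nat) : Int))).prod
      = ((ms.drop (w*j)).take w).prod := by
  rw [PySem.List.slice_natCast]
  have h : w*(j+1) = w*j + w := by ring
  congr 2
  omega

theorem pv_B_eq_model (ms : List Int) (hms : ms ≠ []) : alg10_3_alt ms = pvModel ms := by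
  unfold alg10_3_alt pvModel
  simp only
  have hr0 : ms.length ≠ 0 := by simpa using hms
  rw [if_neg hr0]
  set k := Nat.log2 ms.length with hk
  have htoNat : (((k + 1 : Nat) : Int) - 1).toNat = k := by omega
  rw [htoNat]
  rw [pv_foldl_append_map (f := fun i =>
        (List.range (2 ^ (k - i))).map
          (fun j => (PySem.List.slice ms (some ((2^i*j : Nat) : Int)) (some ((2^i*(j+1) : Nat) : Int))).prod)
        ++ List.replicate (ms.length - 2 ^ (k - i)) (1 : Int))]
  simp only [List.cons_append, List.nil_append, List.cons.injEq, true_and]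
  apply List.map_congr_left
  intro i _
  unfold pvRow
  congr 1
  apply List.map_congr_left
  intro j _
  rw [pv_slice_prod]
  rfl

-- ===== VERDICT (by name: the statement is the Claim_ definition above) =====
theorem alg10_3_spec : Claim_equal_alg10_3 := by
  intro ms _ hpre
  unfold Spec_alg10_3
  rw [pv_A_eq_model ms hpre, pv_B_eq_model ms hpre]
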